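-- pv_equiv track=rewrite | github.com/hephy-dd/sqc | src/sqc/core/utils.py | create_slices
-- ===== SOURCE A (Python) =====
-- from typing import Generator, List, Tuple
--
-- def create_slices(all: List[str], selected: List[str]) -> List[List[str]]:
--     """Create continuous slices of selected names."""
--     slices: List[List[str]] = []
--     keys: List[str] = []
--     for key in all:
--         if key in selected:
--             keys.append(key)
--         else:
--             if keys:
--                 slices.append(keys)
--             keys = []
--     if keys:
--         slices.append(keys)
--     return slices
-- ===== SOURCE B (Python) =====
-- from typing import List
--
--
-- def create_slices(all: List[str], selected: List[str]) -> List[List[str]]: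
--     """Create continuous slices of selected names."""
--     slices: List[List[str]] = []
--     right_selected = False  # was the element to the right selected?
--     for key in reversed(all):
--         if key in selected:
--             if right_selected:
--                 slices[0] = [key] + slices[0]
--             else:
--                 slices = [[key]] + slices
--             right_selected = True
--         else:
--             right_selected = False
--     return slices
-- ===== Notes on version B (the rewrite author's own statement) =====
-- stated objective: alternative
-- what changed: Builds the result back-to-front by scanning the list right-to-left: a selected element either prepends to the current first slice (if its right neighbour was selected) or opens a new first slice, so there is no pending accumulator or flush step.
import Mathlib
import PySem

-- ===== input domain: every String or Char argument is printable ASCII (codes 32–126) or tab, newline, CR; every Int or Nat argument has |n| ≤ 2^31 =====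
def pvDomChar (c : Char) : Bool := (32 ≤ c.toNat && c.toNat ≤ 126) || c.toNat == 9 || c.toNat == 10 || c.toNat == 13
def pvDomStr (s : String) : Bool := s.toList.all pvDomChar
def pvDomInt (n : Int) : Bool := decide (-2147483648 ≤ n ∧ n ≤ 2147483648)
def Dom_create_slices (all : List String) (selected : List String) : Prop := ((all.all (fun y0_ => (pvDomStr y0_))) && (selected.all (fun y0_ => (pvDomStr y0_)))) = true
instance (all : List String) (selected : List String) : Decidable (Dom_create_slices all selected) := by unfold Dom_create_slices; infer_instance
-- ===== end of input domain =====

-- B scans the list right-to-left and builds the result back-to-front: a selected element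
-- prepends to the current first slice or opens a new one; no pending accumulator/flush. Alternative decomposition, same cost.


-- ===== PORT A =====
-- Loop over `all` carrying the state (slices, keys); flush keys on unselected elements and at the end.
def loopA_create_slices (selected : List String) : List String → List (List String) → List String → List (List String) × List String
  | [], slices, keys => (slices, keys)
  | key :: rest, slices, keys =>
    if key ∈ selected then loopA_create_slices selected rest slices (keys ++ [key])
    else if keys ≠ [] then loopA_create_slices selected rest (slices ++ [keys]) []
    else loopA_create_slices selected rest slices []

def create_slices (all : List String) (selected : List String) : List (List String) :=
  let st := loopA_create_slices selected all [] []
  if st.2 ≠ [] then st.1 ++ [st.2] else st.1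

-- ===== PORT B =====
-- One loop iteration: state is (slices, right_selected).
-- (The `| [] => [[key]]` arm is unreachable: right_selected implies slices is nonempty,
-- exactly where the Python indexes slices[0].)
def stepB_create_slices (selected : List String) (key : String) (st : List (List String) × Bool) : List (List String) × Bool :=
  if key ∈ selected then
    (if st.2 then (match st.1 with | g :: gs => (key :: g) :: gs | [] => [[key]]) else [key] :: st.1, true)
  else (st.1, false)

-- for key in reversed(all): …
def loopB_create_slices (selected : List String) : List String → List (List String) × Bool → List (List String) × Bool
  | [], st => st
  | key :: rest, st => loopB_create_slices selected rest (stepB_create_slices selected key st)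

def create_slices_alt (all : List String) (selected : List String) : List (List String) :=
  (loopB_create_slices selected all.reverse ([], false)).1

-- ===== PRECONDITION & SPEC =====
def Spec_create_slices (all : List String) (selected : List String) (out : List (List String)) : Prop := out = create_slices_alt all selected
instance (all : List String) (selected : List String) (out : List (List String)) : Decidable (Spec_create_slices all selected out) := by unfold Spec_create_slices; infer_instance

-- ===== CLAIM (what is proved, stated in full; the proofs are below) =====
def Claim_equal_create_slices : Prop := ∀ (all : List String) (selected : List String), Dom_create_slices all selected → Spec_create_slices all selected (create_slices all selected)

-- ===== LEMMAS AND PROOFS =====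
-- Common characterisation: split into maximal runs of selected elements.
def finB (selected : List String) : List String → List (List String)
  | [] => []
  | x :: xs =>
    if x ∈ selected then
      (x :: xs.takeWhile (fun y => decide (y ∈ selected))) ::
        finB selected (xs.dropWhile (fun y => decide (y ∈ selected)))
    else finB selected xs
termination_by l => l.length
decreasing_by
  · have := List.length_dropWhile_le (fun y => decide (y ∈ selected)) xs
    simp at *; omega
  · simp

def finalizeA (st : List (List String) × List String) : List (List String) :=
  if st.2 ≠ [] then st.1 ++ [st.2] else st.1

lemma finB_nil (selected : List String) : finB selected [] = [] := by rw [finB]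

lemma finB_sel (selected : List String) (x : String) (xs : List String) (hx : x ∈ selected) :
    finB selected (x :: xs) =
      (x :: xs.takeWhile (fun y => decide (y ∈ selected))) ::
        finB selected (xs.dropWhile (fun y => decide (y ∈ selected))) := by
  rw [finB, if_pos hx]

lemma finB_skip (selected : List String) (x : String) (xs : List String) (hx : x ∉ selected) :
    finB selected (x :: xs) = finB selected xs := by
  rw [finB, if_neg hx]

-- ---- A equals finB ----
lemma loopA_spec (selected : List String) (l : List String) :
    ∀ slices keys,
      finalizeA (loopA_create_slices selected l slices keys) =
        slices ++ (if keys = [] then finB selected l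
          else (keys ++ l.takeWhile (fun y => decide (y ∈ selected))) ::
            finB selected (l.dropWhile (fun y => decide (y ∈ selected)))) := by
  induction l with
  | nil =>
    intro slices keys
    cases keys with
    | nil => simp [loopA_create_slices, finalizeA, finB_nil]
    | cons k ks => simp [loopA_create_slices, finalizeA, finB_nil]
  | cons x xs ih =>
    intro slices keys
    by_cases hx : x ∈ selected
    · rw [loopA_create_slices, if_pos hx, ih]
      rw [if_neg (by simp : ¬ (keys ++ [x] = []))]
      cases keys with
      | nil =>
        rw [if_pos rfl, finB_sel selected x xs hx]
        simp [List.takeWhile_cons, List.dropWhile_cons, hx]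
      | cons k ks =>
        rw [if_neg (by simp : ¬ (k :: ks = []))]
        simp [List.takeWhile_cons, List.dropWhile_cons, hx]
    · rw [loopA_create_slices, if_neg hx]
      cases keys with
      | nil =>
        rw [if_neg (by simp : ¬ (¬ ([] : List String) = [])), ih, if_pos rfl, if_pos rfl,
          finB_skip selected x xs hx]
      | cons k ks =>
        rw [if_pos (by simp : ¬ (k :: ks = [])), ih, if_pos rfl,
          if_neg (by simp : ¬ (k :: ks = []))]
        rw [List.takeWhile_cons, if_neg (by simp [hx]), List.dropWhile_cons,
          if_neg (by simp [hx]), finB_skip selected x xs hx]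
        simp

-- ---- B equals finB ----
-- is the head of l (= the right neighbour in B's scan) selected?
def headSelB (selected : List String) : List String → Bool
  | [] => false
  | y :: _ => decide (y ∈ selected)

lemma loopB_append (selected : List String) (a : List String) (x : String) :
    ∀ st, loopB_create_slices selected (a ++ [x]) st =
      stepB_create_slices selected x (loopB_create_slices selected a st) := by
  induction a with
  | nil => intro st; simp [loopB_create_slices]
  | cons y ys ih => intro st; simp [loopB_create_slices, ih]

lemma loopB_spec (selected : List String) (l : List String) :
    loopB_create_slices selected l.reverse ([], false) =
      (finB selected l, headSelB selected l) := by
  induction l with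
  | nil => simp [loopB_create_slices, finB_nil, headSelB]
  | cons x xs ih =>
    rw [List.reverse_cons, loopB_append, ih]
    by_cases hx : x ∈ selected
    · rw [stepB_create_slices, if_pos hx]
      cases xs with
      | nil =>
        simp [headSelB, finB_sel selected x [] hx, finB_nil, hx]
      | cons y ys =>
        by_cases hy : y ∈ selected
        · have h1 : headSelB selected (y :: ys) = true := by simp [headSelB, hy]
          rw [h1, finB_sel selected y ys hy]
          simp [headSelB, hx, finB_sel selected x (y :: ys) hx, hy]
        · have h1 : headSelB selected (y :: ys) = false := by simp [headSelB, hy]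
          rw [h1]
          simp [headSelB, hx, finB_sel selected x (y :: ys) hx, hy]
    · rw [stepB_create_slices, if_neg hx, finB_skip selected x xs hx]
      simp [headSelB, hx]

-- ===== VERDICT (by name: the statement is the Claim_ definition above) =====
theorem create_slices_spec : Claim_equal_create_slices := by
  intro all selected _
  unfold Spec_create_slices create_slices create_slices_alt
  rw [loopB_spec]
  have h := loopA_spec selected all [] []
  simp only [List.nil_append] at h
  exact h
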